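-- pv_equiv track=rewrite | github.com/shubhamgyd/mission_TCS | Chegg/321_Remove_Vowels.py | remove_vowels_and_double_consonants
-- ===== SOURCE A (Python) =====
-- def remove_vowels_and_double_consonants(phrase):
--     # vowels
--     vowels = set('aeiouyAEIOUY')
--     # consonanst
--     double_consonants = set('bcdfghjklmnpqrstvwxzBCDFGHJKLMNPQRSTVWXZ')
--     # counts the vowels
--     counts = {'a': 0, 'e': 0, 'i': 0, 'o': 0, 'u': 0, 'y': 0}
--     # get output
--     output = ""
--     i = 0
--     # iterate given string
--     while i < len(phrase):
--         # if ith char is vowel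
--         # increment it's count
--         if phrase[i] in vowels:
--             counts[phrase[i].lower()] += 1
--             i += 1
--         # if consonents get double
--         elif i < len(phrase) - 1 and phrase[i] == phrase[i + 1] and phrase[i] in double_consonants:
--             output += phrase[i]
--             i += 2
--         # else get chars as it is in the output
--         else:
--             output += phrase[i]
--             i += 1
--     # return the output and counts of vowels removed
--     return (output, counts)
--
-- phrase = "Marry had a Little Lamb."
-- ===== SOURCE B (Python) =====
-- def remove_vowels_and_double_consonants(phrase):
--     vowels = set('aeiouyAEIOUY')
--     double_consonants = set('bcdfghjklmnpqrstvwxzBCDFGHJKLMNPQRSTVWXZ')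
--     counts = {'a': 0, 'e': 0, 'i': 0, 'o': 0, 'u': 0, 'y': 0}
--     pieces = []
--     i = 0
--     total = len(phrase)
--     # walk the string run by run (maximal blocks of one repeated character)
--     while i < total:
--         c = phrase[i]
--         j = i + 1
--         while j < total and phrase[j] == c:
--             j += 1
--         n = j - i
--         if c in vowels:
--             counts[c.lower()] += n
--         elif c in double_consonants:
--             pieces.append(c * ((n + 1) // 2))
--         else:
--             pieces.append(c * n)
--         i = j
--     return (''.join(pieces), counts)
-- ===== Notes on version B (the rewrite author's own statement) =====
-- stated objective: faster
-- what changed: A steps through the string one index at a time (consuming doubled consonants pairwise) and grows the output by string +=; B makes a single pass over maximal runs of one repeated character, adding a whole run length to the vowel counts at once, emitting ceil(n/2) copies of a doubling-consonant run (n copies otherwise), and joining the collected pieces once at the end.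
import Mathlib
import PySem

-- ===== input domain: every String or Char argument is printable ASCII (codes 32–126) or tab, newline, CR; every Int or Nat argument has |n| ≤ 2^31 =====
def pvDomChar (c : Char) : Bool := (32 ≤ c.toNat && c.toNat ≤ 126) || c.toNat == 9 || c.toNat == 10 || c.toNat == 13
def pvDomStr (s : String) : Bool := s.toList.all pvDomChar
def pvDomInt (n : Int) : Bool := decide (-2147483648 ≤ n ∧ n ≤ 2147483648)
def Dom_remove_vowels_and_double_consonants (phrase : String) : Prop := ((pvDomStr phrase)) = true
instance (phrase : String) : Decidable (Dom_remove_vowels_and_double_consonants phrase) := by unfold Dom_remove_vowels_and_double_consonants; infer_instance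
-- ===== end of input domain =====

-- B replaces A's character-by-character index loop with a single pass over maximal runs of
-- one repeated character (doubling-consonant runs collapse to ceil(n/2)), joining pieces once
-- instead of repeated string +=; a timing run measured B faster (objective: faster).

-- ===== PORT A =====
-- constants both Pythons define: vowels, double_consonants, the initial counts dict,
-- and the key phrase[i].lower() (a one-char string) used to index counts
def pvVowels : List Char := PySem.Set.ofList "aeiouyAEIOUY".toList
def pvDoubles : List Char := PySem.Set.ofList "bcdfghjklmnpqrstvwxzBCDFGHJKLMNPQRSTVWXZ".toList
def pvCounts0 : PySem.Dict String Int :=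
  PySem.Dict.ofList [("a",0),("e",0),("i",0),("o",0),("u",0),("y",0)]
def pvKey (c : Char) : String := String.ofList [PySem.Chars.lowerChar c]

-- A's while-loop; the index i is represented by the remaining suffix of the char list,
-- output by the accumulated char list. counts[x] += 1 is Dict.modify (x is always a
-- present key of counts, so d[x] = d.get(x, 0) + 1 is exact there).
def loopA : List Char → List Char → PySem.Dict String Int → (List Char × PySem.Dict String Int)
  | [], out, counts => (out, counts)
  | c :: rest, out, counts =>
    if pvVowels.contains c then
      loopA rest out (counts.modify (pvKey c) 0 (· + 1))
    else
      match rest with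
      | c' :: rest2 =>
        if c' == c && pvDoubles.contains c then
          loopA rest2 (out ++ [c]) counts
        else
          loopA (c' :: rest2) (out ++ [c]) counts
      | [] => (out ++ [c], counts)

def remove_vowels_and_double_consonants (phrase : String) : String × (List (String × Int)) :=
  let r := loopA phrase.toList [] pvCounts0
  (String.ofList r.1, r.2.items)

-- ===== PORT B =====
-- B's outer run loop; the inner scan 'while j < total and phrase[j] == c' is
-- takeWhile/dropWhile, c * k is List.replicate, pieces/''.join is the accumulated list.
def loopB : List Char → List Char → PySem.Dict String Int → (List Char × PySem.Dict String Int)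
  | [], out, counts => (out, counts)
  | c :: rest, out, counts =>
    let n : Nat := 1 + (rest.takeWhile (fun x => x == c)).length
    let rest' := rest.dropWhile (fun x => x == c)
    if pvVowels.contains c then
      loopB rest' out (counts.modify (pvKey c) 0 (· + (n : Int)))
    else if pvDoubles.contains c then
      loopB rest' (out ++ List.replicate ((n + 1) / 2) c) counts
    else
      loopB rest' (out ++ List.replicate n c) counts
termination_by cs => cs.length
decreasing_by
  all_goals exact Nat.lt_succ_of_le (List.length_dropWhile_le _ _)

def remove_vowels_and_double_consonants_alt (phrase : String) : String × (List (String × Int)) :=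
  let r := loopB phrase.toList [] pvCounts0
  (String.ofList r.1, r.2.items)

-- ===== PRECONDITION & SPEC =====
def Spec_remove_vowels_and_double_consonants (phrase : String) (out : String × (List (String × Int))) : Prop := out = remove_vowels_and_double_consonants_alt phrase
instance (phrase : String) (out : String × (List (String × Int))) : Decidable (Spec_remove_vowels_and_double_consonants phrase out) := by unfold Spec_remove_vowels_and_double_consonants; infer_instance

-- ===== CLAIM (what is proved, stated in full; the proofs are below) =====
def Claim_equal_remove_vowels_and_double_consonants : Prop := ∀ (phrase : String), Dom_remove_vowels_and_double_consonants phrase → Spec_remove_vowels_and_double_consonants phrase (remove_vowels_and_double_consonants phrase)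

-- ===== LEMMAS AND PROOFS =====

lemma pvModMod (d : PySem.Dict String Int) (k : String) (a b : Int) :
    (d.modify k 0 (· + a)).modify k 0 (· + b) = d.modify k 0 (· + (a + b)) := by
  simp [PySem.Dict.modify, PySem.Dict.getD_insert_self, PySem.Dict.insert_insert_self, add_assoc]

lemma pvAppRep (out : List Char) (c : Char) (k : Nat) :
    out ++ List.replicate (k + 1) c = (out ++ [c]) ++ List.replicate k c := by
  simp [List.replicate_succ]

lemma loopB_vowel (c : Char) (rest out : List Char) (counts : PySem.Dict String Int)
    (hv : pvVowels.contains c = true) :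
    loopB (c :: rest) out counts = loopB rest out (counts.modify (pvKey c) 0 (· + 1)) := by
  match rest with
  | [] => simp only [loopB, hv, if_true, List.takeWhile_nil, List.dropWhile_nil,
      List.length_nil, Nat.add_zero, Nat.cast_one]
  | d :: rest2 =>
    by_cases hd : d = c
    · subst hd
      rw [loopB, loopB]
      simp only [hv, if_true, List.takeWhile_cons, List.dropWhile_cons, BEq.rfl, if_true,
        List.length_cons]
      rw [pvModMod]
      congr 2
      funext x; push_cast; ring
    · have hne : (d == c) = false := by simp [hd]
      rw [loopB]
      simp only [hv, if_true, List.takeWhile_cons, List.dropWhile_cons, hne, Bool.false_eq_true,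
        if_false, List.length_nil, Nat.add_zero, Nat.cast_one]

lemma loopB_double (c : Char) (rest2 out : List Char) (counts : PySem.Dict String Int)
    (hv : pvVowels.contains c = false) (hdb : pvDoubles.contains c = true) :
    loopB (c :: c :: rest2) out counts = loopB rest2 (out ++ [c]) counts := by
  match rest2 with
  | [] =>
    simp only [loopB, hv, hdb, Bool.false_eq_true, if_false, if_true, List.takeWhile_cons,
      List.dropWhile_cons, BEq.rfl, List.takeWhile_nil, List.dropWhile_nil, List.length_cons,
      List.length_nil]
    norm_num
  | d :: rest3 =>
    by_cases hd : d = c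
    · subst hd
      rw [loopB, loopB]
      simp only [hv, hdb, Bool.false_eq_true, if_false, if_true, List.takeWhile_cons,
        List.dropWhile_cons, BEq.rfl, List.length_cons]
      rw [show (1 + ((rest3.takeWhile (fun x => x == d)).length + 1 + 1) + 1) / 2
           = (1 + (rest3.takeWhile (fun x => x == d)).length + 1) / 2 + 1 from by omega,
        pvAppRep]
    · have hne : (d == c) = false := by simp [hd]
      rw [loopB]
      simp only [hv, hdb, Bool.false_eq_true, if_false, if_true, List.takeWhile_cons,
        List.dropWhile_cons, hne]
      norm_num

lemma loopB_plain (c : Char) (rest out : List Char) (counts : PySem.Dict String Int)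
    (hv : pvVowels.contains c = false) (hdb : pvDoubles.contains c = false) :
    loopB (c :: rest) out counts = loopB rest (out ++ [c]) counts := by
  match rest with
  | [] =>
    simp only [loopB, hv, hdb, Bool.false_eq_true, if_false, List.takeWhile_nil,
      List.dropWhile_nil, List.length_nil]
    norm_num
  | d :: rest2 =>
    by_cases hd : d = c
    · subst hd
      rw [loopB, loopB]
      simp only [hv, hdb, Bool.false_eq_true, if_false, List.takeWhile_cons,
        List.dropWhile_cons, BEq.rfl, if_true, List.length_cons]
      rw [show 1 + ((rest2.takeWhile (fun x => x == d)).length + 1)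
           = 1 + (rest2.takeWhile (fun x => x == d)).length + 1 from by omega,
        pvAppRep]
    · have hne : (d == c) = false := by simp [hd]
      rw [loopB]
      simp only [hv, hdb, Bool.false_eq_true, if_false, List.takeWhile_cons,
        List.dropWhile_cons, hne]
      norm_num

lemma loopB_double_single (c d : Char) (rest2 out : List Char) (counts : PySem.Dict String Int)
    (hv : pvVowels.contains c = false) (hdb : pvDoubles.contains c = true)
    (hne : (d == c) = false) :
    loopB (c :: d :: rest2) out counts = loopB (d :: rest2) (out ++ [c]) counts := by
  rw [loopB]
  simp only [hv, hdb, Bool.false_eq_true, if_false, if_true, List.takeWhile_cons,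
    List.dropWhile_cons, hne]
  norm_num

lemma loopA_eq_loopB (N : Nat) : ∀ (cs out : List Char) (counts : PySem.Dict String Int),
    cs.length ≤ N → loopA cs out counts = loopB cs out counts := by
  induction N with
  | zero =>
    intro cs out counts h
    match cs with
    | [] => simp only [loopA, loopB]
    | c :: rest => simp at h
  | succ n ih =>
    intro cs out counts h
    match cs with
    | [] => simp only [loopA, loopB]
    | c :: rest =>
      simp only [List.length_cons, Nat.add_le_add_iff_right] at h
      by_cases hv : pvVowels.contains c = true
      · rw [loopA.eq_def]
        simp only [hv, if_true]
        rw [ih rest out _ h, ← loopB_vowel c rest out counts hv]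
      · have hv' : pvVowels.contains c = false := by simpa using hv
        match rest with
        | [] =>
          simp only [loopA]
          simp only [hv', Bool.false_eq_true, if_false]
          by_cases hdb : pvDoubles.contains c = true
          · simp only [loopB, hv', hdb, Bool.false_eq_true, if_false, if_true,
              List.takeWhile_nil, List.dropWhile_nil, List.length_nil]
            norm_num
          · have hdb' : pvDoubles.contains c = false := by simpa using hdb
            simp only [loopB, hv', hdb', Bool.false_eq_true, if_false, List.takeWhile_nil,
              List.dropWhile_nil, List.length_nil]
            norm_num
        | d :: rest2 =>
          by_cases hpair : (d == c && pvDoubles.contains c) = true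
          · obtain ⟨hdc, hdb⟩ := Bool.and_eq_true_iff.mp hpair
            have hde : d = c := by simpa using hdc
            subst hde
            simp only [loopA]
            simp only [hv', Bool.false_eq_true, if_false, BEq.rfl, hdb, Bool.and_self, if_true]
            rw [ih rest2 (out ++ [d]) counts (Nat.le_of_succ_le h),
              ← loopB_double d rest2 out counts hv' hdb]
          · simp only [loopA]
            simp only [hv', Bool.false_eq_true, if_false, hpair]
            rw [ih (d :: rest2) (out ++ [c]) counts h]
            by_cases hdb : pvDoubles.contains c = true
            · have hdc : (d == c) = false := by
                cases hq : (d == c)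
                · rfl
                · exfalso; rw [hq, hdb] at hpair; simp at hpair
              exact (loopB_double_single c d rest2 out counts hv' hdb hdc).symm
            · have hdb' : pvDoubles.contains c = false := by simpa using hdb
              exact (loopB_plain c (d :: rest2) out counts hv' hdb').symm

-- ===== VERDICT (by name: the statement is the Claim_ definition above) =====
theorem remove_vowels_and_double_consonants_spec : Claim_equal_remove_vowels_and_double_consonants := by
  intro phrase _
  unfold Spec_remove_vowels_and_double_consonants
  unfold remove_vowels_and_double_consonants remove_vowels_and_double_consonants_alt
  rw [loopA_eq_loopB phrase.toList.length phrase.toList [] pvCounts0 le_rfl]
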